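-- pv_equiv track=rewrite | github.com/imji0319/myProject | pro1/Lab05/s20140543_Assignment05.py | D3
-- ===== SOURCE A (Python) =====
-- def D3(password):
--     count=0
--     for i in password:
--         i_count=password.count(i)
--         if i_count==1:
--             count+=1
--
--     D3=3*(len(password)-count)
--
--     return D3
-- ===== SOURCE B (Python) =====
-- def D3(password):
--     freq = {}
--     for ch in password:
--         freq[ch] = freq.get(ch, 0) + 1
--     total = 0
--     for c in freq.values():
--         if c > 1:
--             total += c
--     return 3 * total
-- ===== Notes on version B (the rewrite author's own statement) =====
-- stated objective: faster
-- what changed: Replaces A's per-position password.count scan (and the count==1 subtraction) by one frequency-table build followed by a pass over the distinct characters' counts, summing those greater than 1.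
import Mathlib
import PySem

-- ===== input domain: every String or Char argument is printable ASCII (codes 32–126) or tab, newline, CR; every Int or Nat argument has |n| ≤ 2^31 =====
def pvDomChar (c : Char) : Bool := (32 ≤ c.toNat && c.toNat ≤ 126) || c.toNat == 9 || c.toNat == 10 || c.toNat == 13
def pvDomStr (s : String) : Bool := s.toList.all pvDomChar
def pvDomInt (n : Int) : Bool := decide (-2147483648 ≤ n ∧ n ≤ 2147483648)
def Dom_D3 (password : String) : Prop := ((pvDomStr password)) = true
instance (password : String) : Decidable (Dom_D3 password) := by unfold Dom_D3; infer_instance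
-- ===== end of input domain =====

-- B replaces A's per-position password.count scan by one frequency-table build plus a pass over the distinct counts (faster).

-- ===== PORT A =====
def D3 (password : String) : Int :=
  let count : Int := password.toList.foldl (fun count i =>
    let i_count := PySem.Str.count password (String.singleton i)
    if i_count == 1 then count + 1 else count) 0
  3 * ((PySem.Str.len password : Int) - count)

-- ===== PORT B =====
def D3_alt (password : String) : Int :=
  let freq : PySem.Dict Char Int := password.toList.foldl
    (fun d ch => d.insert ch (d.getD ch 0 + 1)) PySem.Dict.empty
  let total : Int := freq.values.foldl (fun acc c => if c > 1 then acc + c else acc) 0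
  3 * total

-- ===== PRECONDITION & SPEC =====
def Spec_D3 (password : String) (out : Int) : Prop := out = D3_alt password
instance (password : String) (out : Int) : Decidable (Spec_D3 password out) := by unfold Spec_D3; infer_instance

-- ===== CLAIM (what is proved, stated in full; the proofs are below) =====
def Claim_equal_D3 : Prop := ∀ (password : String), Dom_D3 password → Spec_D3 password (D3 password)

-- ===== LEMMAS AND PROOFS =====

-- Python s.count(sub) on a one-character sub is the character count.
theorem countGo_singleton (c : Char) : ∀ (l : List Char) (fuel acc : Nat), l.length ≤ fuel →
    PySem.Chars.count.go [c] fuel l acc = acc + l.count c := by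
  intro l
  induction l with
  | nil =>
    intro fuel acc _
    cases fuel <;> simp [PySem.Chars.count.go]
  | cons h t ih =>
    intro fuel acc hle
    cases fuel with
    | zero => simp at hle
    | succ f =>
      have hf : t.length ≤ f := by simpa using hle
      rw [PySem.Chars.count.go]
      by_cases hch : c = h
      · subst hch
        simp only [List.isPrefixOf, beq_self_eq_true, Bool.true_and,
          if_pos, List.length_cons, List.drop_succ_cons, List.length_nil, List.drop_zero]
        rw [ih f (acc + 1) hf]
        simp
        omega
      · have hpre : ([c].isPrefixOf (h :: t)) = false := by
          simp [List.isPrefixOf]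
          exact hch
        rw [hpre]
        simp only [Bool.false_eq_true, if_false]
        rw [ih f acc hf]
        have hhc : (h == c) = false := by
          simp
          exact fun hh => hch hh.symm
        simp [List.count_cons, hhc]

theorem count_singleton (l : List Char) (c : Char) :
    PySem.Chars.count l [c] = l.count c := by
  rw [PySem.Chars.count]
  simp only [List.isEmpty_cons]
  simpa using countGo_singleton c l l.length 0 le_rfl

-- sum of an ite-map is the sum over the filtered list
theorem sum_map_ite_filter {α : Type} (p : α → Bool) (f : α → Int) (l : List α) :
    (l.map (fun x => if p x then f x else 0)).sum = ((l.filter p).map f).sum := by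
  induction l with
  | nil => simp
  | cons h t ih =>
    by_cases hp : p h <;> simp [hp, ih]

-- B's accumulation loop as a map-sum
theorem foldl_ite_add (xs : List Int) :
    xs.foldl (fun acc c => if c > 1 then acc + c else acc) 0
      = (xs.map (fun c => if c > 1 then c else 0)).sum := by
  suffices h : ∀ a, xs.foldl (fun acc c => if c > 1 then acc + c else acc) a
      = a + (xs.map (fun c => if c > 1 then c else 0)).sum by simpa using h 0
  induction xs with
  | nil => simp
  | cons h t ih =>
    intro a
    by_cases hc : h > 1 <;> simp [hc, ih] <;> ring

-- cast a Nat-valued map-sum to Int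
theorem sum_map_cast {α : Type} (f : α → Nat) (l : List α) :
    (l.map (fun x => ((f x : Nat) : Int))).sum = ((l.map f).sum : Int) := by
  induction l with
  | nil => simp
  | cons h t ih => simp [ih]

-- ===== VERDICT (by name: the statement is the Claim_ definition above) =====
theorem D3_spec : Claim_equal_D3 := by
  unfold Claim_equal_D3 Spec_D3
  intro password _
  simp only [D3, D3_alt]
  set l := password.toList with hl
  -- A side: the loop counts positions whose character occurs exactly once
  rw [PySem.List.foldl_if_add_one (fun i => PySem.Str.count password (String.singleton i) == 1)]
  -- B side: the frequency dict is Counter(l); its values are the counts of the distinct chars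
  rw [PySem.Dict.foldl_insert_getD_add_one_eq_counter]
  simp only [PySem.Dict.values, PySem.Dict.items_counter, List.map_map]
  rw [foldl_ite_add]
  rw [List.map_map]
  have hcomp : ((fun c : Int => if c > 1 then c else 0) ∘ (fun (x : Char × Int) => x.2) ∘
      fun k => (k, (List.count k l : Int)))
      = (fun k => if (decide (1 < List.count k l)) then ((List.count k l : Int)) else 0) := by
    funext k
    by_cases h : 1 < List.count k l <;> simp [h]
  rw [hcomp, sum_map_ite_filter]
  have hperm : List.Perm (PySem.Set.ofList l) l.dedup :=
    (List.perm_ext_iff_of_nodup (PySem.Set.nodup_ofList l) l.nodup_dedup).mpr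
      (fun a => by simp [PySem.Set.mem_ofList, List.mem_dedup])
  rw [List.Perm.sum_eq ((hperm.filter _).map _)]
  rw [sum_map_cast, List.sum_map_count_dedup_filter_eq_countP]
  -- rewrite A's per-position substring count into a character count
  have hq : (fun i => PySem.Str.count password (String.singleton i) == 1)
      = (fun i => List.count i l == 1) := by
    funext i
    rw [PySem.Str.count_eq]
    have hmi : (String.singleton i).toList = [i] := by simp
    rw [hmi, ← hl, count_singleton]
  rw [hq]
  have hlen : (PySem.Str.len password : Int) = (l.length : Int) := by simp [hl]
  rw [hlen]
  -- arithmetic: len - #(count=1) = #(count>1), since every char of l occurs at least once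
  have hsplit := List.length_eq_countP_add_countP (p := fun i => List.count i l == 1) (l := l)
  beta_reduce at hsplit
  have hcongr : List.countP (fun a => decide (¬ (List.count a l == 1) = true)) l
      = List.countP (fun k => decide (1 < List.count k l)) l := by
    apply List.countP_congr
    intro a ha
    have hpos : 0 < List.count a l := List.count_pos_iff.mpr ha
    by_cases h1 : List.count a l = 1
    · simp [h1]
    · have hgt : 1 < List.count a l := by omega
      simp [h1, hgt]
  omega
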